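-- pv_equiv track=rewrite | github.com/santymetal/AI_log_analyzer | desktop-analyzer-ultimate.py | detect_log_type
-- ===== SOURCE A (Python) =====
-- def detect_log_type(content):
--     """Detect log type from content"""
--     content_lower = content.lower()
--
--     # Firmware/Hardware indicators
--     firmware_keywords = ['vrm', 'voltage', 'thermal', 'ecc', 'memory', 'cpu', 'bios', 'dimm', 'sensors', 'temperature']
--     firmware_score = sum(1 for keyword in firmware_keywords if keyword in content_lower)
--
--     # Pipeline/CI-CD indicators
--     pipeline_keywords = ['build', 'deploy', 'pipeline', 'azure', 'jenkins', 'docker', 'npm', 'maven', 'gradle']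
--     pipeline_score = sum(1 for keyword in pipeline_keywords if keyword in content_lower)
--
--     # Testing indicators
--     testing_keywords = ['test', 'assert', 'pytest', 'jest', 'junit', 'spec', 'mock', 'fixture']
--     testing_score = sum(1 for keyword in testing_keywords if keyword in content_lower)
--
--     # Determine log type
--     scores = {'firmware': firmware_score, 'pipeline': pipeline_score, 'testing': testing_score}
--     detected_type = max(scores, key=scores.get) if max(scores.values()) > 2 else 'general'
--
--     return detected_type
-- ===== SOURCE B (Python) =====
-- KEYWORDS = {
--     'firmware': ('vrm', 'voltage', 'thermal', 'ecc', 'memory', 'cpu',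
--                  'bios', 'dimm', 'sensors', 'temperature'),
--     'pipeline': ('build', 'deploy', 'pipeline', 'azure', 'jenkins',
--                  'docker', 'npm', 'maven', 'gradle'),
--     'testing': ('test', 'assert', 'pytest', 'jest', 'junit', 'spec',
--                 'mock', 'fixture'),
-- }
--
--
-- def detect_log_type(content):
--     """Detect log type from content"""
--     text = content.lower()
--     patterns = [kw for kws in KEYWORDS.values() for kw in kws]
--     # one left-to-right scan: at each position, try every pattern
--     found = set()
--     for i in range(len(text)):
--         for kw in patterns:
--             if text.startswith(kw, i):
--                 found.add(kw)
--     counts = {cat: sum(1 for kw in kws if kw in found)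
--               for cat, kws in KEYWORDS.items()}
--     best = max(counts, key=counts.get)
--     return best if counts[best] > 2 else 'general'
-- ===== Notes on version B (the rewrite author's own statement) =====
-- stated objective: alternative
-- what changed: Replaces A's 27 independent substring-membership scans with a naive multi-pattern matcher: one left-to-right scan over the lowered text trying every keyword at each position into a found-set, followed by a tally of each category's keywords against that set.
import Mathlib
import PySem

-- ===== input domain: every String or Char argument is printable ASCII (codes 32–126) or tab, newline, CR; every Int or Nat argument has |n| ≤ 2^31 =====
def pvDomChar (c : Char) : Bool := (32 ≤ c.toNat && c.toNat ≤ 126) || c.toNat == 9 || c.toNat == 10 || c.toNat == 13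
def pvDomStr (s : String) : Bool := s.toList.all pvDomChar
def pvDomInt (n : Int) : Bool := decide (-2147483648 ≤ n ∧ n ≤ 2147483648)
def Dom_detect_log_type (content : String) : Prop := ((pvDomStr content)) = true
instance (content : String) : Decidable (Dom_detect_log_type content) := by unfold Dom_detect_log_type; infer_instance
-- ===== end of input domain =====

-- B replaces A's 27 independent substring scans by one left-to-right position scan over the
-- lowered text (naive multi-pattern matcher into a found-set) plus a tally from that set
-- (alternative algorithm, same asymptotic cost).

-- ===== PORT A =====
def fwKeywords : List String :=
  ["vrm", "voltage", "thermal", "ecc", "memory", "cpu", "bios", "dimm", "sensors", "temperature"]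
def plKeywords : List String :=
  ["build", "deploy", "pipeline", "azure", "jenkins", "docker", "npm", "maven", "gradle"]
def tsKeywords : List String :=
  ["test", "assert", "pytest", "jest", "junit", "spec", "mock", "fixture"]

def detect_log_type (content : String) : String :=
  let content_lower := PySem.Str.lower content
  let firmware_score : Int :=
    fwKeywords.foldl (fun a k => if PySem.Str.isIn k content_lower then a + 1 else a) 0
  let pipeline_score : Int :=
    plKeywords.foldl (fun a k => if PySem.Str.isIn k content_lower then a + 1 else a) 0
  let testing_score : Int :=
    tsKeywords.foldl (fun a k => if PySem.Str.isIn k content_lower then a + 1 else a) 0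
  let scores : PySem.Dict String Int :=
    PySem.Dict.mk [("firmware", firmware_score), ("pipeline", pipeline_score), ("testing", testing_score)]
  if 2 < (PySem.List.max? scores.values (fun v => v)).getD 0 then
    (PySem.List.max? scores.keys (fun k => scores.getD k 0)).getD "general"
  else "general"

-- ===== PORT B =====
def pvKeywords : List (String × List String) :=
  [("firmware", ["vrm", "voltage", "thermal", "ecc", "memory", "cpu", "bios", "dimm", "sensors", "temperature"]),
   ("pipeline", ["build", "deploy", "pipeline", "azure", "jenkins", "docker", "npm", "maven", "gradle"]),
   ("testing", ["test", "assert", "pytest", "jest", "junit", "spec", "mock", "fixture"])]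

def detect_log_type_alt (content : String) : String :=
  let text := (PySem.Str.lower content).toList
  let patterns := pvKeywords.flatMap (fun p => p.2)
  -- one scan over positions; text.startswith(kw, i): i comes from range(len(text)), so 0 ≤ i
  -- and `Chars.startswith (text.drop i.toNat)` is exact
  let found : PySem.Set String :=
    (PySem.List.pyRange 0 (text.length : Int) 1).foldl
      (fun s i =>
        patterns.foldl
          (fun s kw => if PySem.Chars.startswith (text.drop i.toNat) kw.toList then PySem.Set.add s kw else s)
          s)
      PySem.Set.empty
  let counts : PySem.Dict String Int :=
    PySem.Dict.mk (pvKeywords.map (fun p =>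
      (p.1, p.2.foldl (fun a kw => if PySem.Set.contains found kw then a + 1 else a) (0 : Int))))
  let best := (PySem.List.max? counts.keys (fun k => counts.getD k 0)).getD "general"
  if 2 < counts.getD best 0 then best else "general"

-- ===== PRECONDITION & SPEC =====
def Spec_detect_log_type (content : String) (out : String) : Prop := out = detect_log_type_alt content
instance (content : String) (out : String) : Decidable (Spec_detect_log_type content out) := by unfold Spec_detect_log_type; infer_instance

-- ===== CLAIM (what is proved, stated in full; the proofs are below) =====
def Claim_equal_detect_log_type : Prop := ∀ (content : String), Dom_detect_log_type content → Spec_detect_log_type content (detect_log_type content)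

-- ===== LEMMAS AND PROOFS =====

/-- Inner loop of B's scan: folding `add` guarded by a predicate. -/
lemma mem_inner_fold (ks : List String) (p : String → Bool) :
    ∀ (s : List String) (x : String),
      x ∈ ks.foldl (fun s kw => if p kw then PySem.Set.add s kw else s) s ↔
        x ∈ s ∨ (x ∈ ks ∧ p x = true) := by
  induction ks with
  | nil => intro s x; simp
  | cons k t ih =>
    intro s x
    by_cases hp : p k = true
    · rw [List.foldl_cons, if_pos hp, ih]
      rw [PySem.Set.mem_add]
      constructor
      · rintro ((h | h) | ⟨h1, h2⟩)
        · exact Or.inl h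
        · subst h; exact Or.inr ⟨List.mem_cons_self, hp⟩
        · exact Or.inr ⟨List.mem_cons_of_mem _ h1, h2⟩
      · rintro (h | ⟨h1, h2⟩)
        · exact Or.inl (Or.inl h)
        · rcases List.mem_cons.1 h1 with h | h
          · exact Or.inl (Or.inr h)
          · exact Or.inr ⟨h, h2⟩
    · rw [List.foldl_cons, if_neg hp, ih]
      constructor
      · rintro (h | ⟨h1, h2⟩)
        · exact Or.inl h
        · exact Or.inr ⟨List.mem_cons_of_mem _ h1, h2⟩
      · rintro (h | ⟨h1, h2⟩)
        · exact Or.inl h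
        · rcases List.mem_cons.1 h1 with h | h
          · subst h; exact absurd h2 hp
          · exact Or.inr ⟨h, h2⟩

/-- The whole scan: x was collected iff it is a pattern matching at some visited position. -/
lemma mem_scan_fold (is : List Int) (ks : List String) (q : Int → String → Bool) :
    ∀ (s : List String) (x : String),
      x ∈ is.foldl (fun s i => ks.foldl (fun s kw => if q i kw then PySem.Set.add s kw else s) s) s ↔
        x ∈ s ∨ (x ∈ ks ∧ ∃ i ∈ is, q i x = true) := by
  induction is with
  | nil => intro s x; simp
  | cons i t ih =>
    intro s x
    rw [List.foldl_cons, ih, mem_inner_fold]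
    constructor
    · rintro ((h | ⟨h1, h2⟩) | ⟨h1, i', hi', h2⟩)
      · exact Or.inl h
      · exact Or.inr ⟨h1, i, List.mem_cons_self, h2⟩
      · exact Or.inr ⟨h1, i', List.mem_cons_of_mem _ hi', h2⟩
    · rintro (h | ⟨h1, i', hi', h2⟩)
      · exact Or.inl (Or.inl h)
      · rcases List.mem_cons.1 hi' with h | h
        · subst h; exact Or.inl (Or.inr ⟨h1, h2⟩)
        · exact Or.inr ⟨h1, i', h, h2⟩

/-- For a nonempty pattern, matching at some scanned position is exactly being an infix. -/
lemma scan_pos_iff_infix (cl : List Char) (kw : List Char) (hkw : kw ≠ []) :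
    (∃ i ∈ PySem.List.pyRange 0 (cl.length : Int) 1,
        PySem.Chars.startswith (cl.drop i.toNat) kw = true) ↔ kw <+: cl ∨ kw <:+: cl := by
  constructor
  · rintro ⟨i, hi, hsw⟩
    refine Or.inr ?_
    have hpre : kw <+: cl.drop i.toNat := (PySem.Chars.startswith_iff _ _).1 hsw
    have : PySem.Chars.isIn kw cl = true :=
      (PySem.Chars.exists_prefix_drop_iff_isIn kw cl).1 ⟨i.toNat, hpre⟩
    exact (PySem.Chars.isIn_iff_infix kw cl).1 this
  · intro h
    have hinf : kw <:+: cl := by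
      rcases h with h | h
      · exact h.isInfix
      · exact h
    have : PySem.Chars.isIn kw cl = true := (PySem.Chars.isIn_iff_infix kw cl).2 hinf
    obtain ⟨j, hpre⟩ := (PySem.Chars.exists_prefix_drop_iff_isIn kw cl).2 this
    have hj : j < cl.length := by
      by_contra hge
      push Not at hge
      rw [List.drop_eq_nil_of_le hge] at hpre
      exact hkw (List.prefix_nil.1 hpre)
    refine ⟨(j : Int), ?_, ?_⟩
    · rw [PySem.List.mem_pyRange_one]
      constructor
      · exact Int.natCast_nonneg j
      · exact_mod_cast hj
    · rw [Int.toNat_natCast]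
      exact (PySem.Chars.startswith_iff _ _).2 hpre

/-- A's `sum(1 for k in ks if c(k))` fold counts the filtered elements. -/
lemma foldl_count_eq_filter_length (c : String → Bool) (ks : List String) (a : Int) :
    ks.foldl (fun a k => if c k then a + 1 else a) a = a + ((ks.filter c).length : Int) := by
  induction ks generalizing a with
  | nil => simp
  | cons k t ih =>
    by_cases h : c k = true
    · rw [List.foldl_cons, if_pos h, ih, List.filter_cons_of_pos h, List.length_cons]
      push_cast; ring
    · rw [List.foldl_cons, if_neg h, ih, List.filter_cons_of_neg h]

/-- The final selection: A tests the max of the values then takes the argmax; B takes the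
argmax and tests its own count; over a three-entry dict with these keys they agree. -/
lemma choose_eq (F P T : Int) :
    (if 2 < (PySem.List.max? (PySem.Dict.mk [("firmware", F), ("pipeline", P), ("testing", T)]).values (fun v => v)).getD 0 then
      (PySem.List.max? (PySem.Dict.mk [("firmware", F), ("pipeline", P), ("testing", T)]).keys
        (fun k => (PySem.Dict.mk [("firmware", F), ("pipeline", P), ("testing", T)]).getD k 0)).getD "general"
    else "general")
    = (if 2 < (PySem.Dict.mk [("firmware", F), ("pipeline", P), ("testing", T)]).getD
          ((PySem.List.max? (PySem.Dict.mk [("firmware", F), ("pipeline", P), ("testing", T)]).keys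
            (fun k => (PySem.Dict.mk [("firmware", F), ("pipeline", P), ("testing", T)]).getD k 0)).getD "general") 0 then
        (PySem.List.max? (PySem.Dict.mk [("firmware", F), ("pipeline", P), ("testing", T)]).keys
          (fun k => (PySem.Dict.mk [("firmware", F), ("pipeline", P), ("testing", T)]).getD k 0)).getD "general"
      else "general") := by
  have hgF : (PySem.Dict.mk [("firmware", F), ("pipeline", P), ("testing", T)]).getD "firmware" 0 = F := by
    rfl
  have hgP : (PySem.Dict.mk [("firmware", F), ("pipeline", P), ("testing", T)]).getD "pipeline" 0 = P := by
    simp [PySem.Dict.getD, PySem.Dict.get?_mk_cons]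
  have hgT : (PySem.Dict.mk [("firmware", F), ("pipeline", P), ("testing", T)]).getD "testing" 0 = T := by
    simp [PySem.Dict.getD, PySem.Dict.get?_mk_cons]
  simp only [PySem.Dict.keys_mk, PySem.Dict.values_mk, List.map, PySem.List.max?, List.foldl,
    hgF, hgP, hgT]
  by_cases h1 : F < P
  · by_cases h2 : P < T
    · simp [h1, h2, hgP, hgT]
    · simp [h1, h2, hgP]
  · by_cases h2 : F < T
    · simp [h1, h2, hgF, hgT]
    · simp [h1, h2, hgF]

lemma patterns_ne_nil : ∀ k ∈ pvKeywords.flatMap (fun p => p.2), k.toList ≠ [] := by decide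

lemma fw_sub : ∀ k ∈ fwKeywords, k ∈ pvKeywords.flatMap (fun p => p.2) := by decide
lemma pl_sub : ∀ k ∈ plKeywords, k ∈ pvKeywords.flatMap (fun p => p.2) := by decide
lemma ts_sub : ∀ k ∈ tsKeywords, k ∈ pvKeywords.flatMap (fun p => p.2) := by decide

-- ===== VERDICT (by name: the statement is the Claim_ definition above) =====
set_option maxHeartbeats 1600000 in
theorem detect_log_type_spec : Claim_equal_detect_log_type := by
  intro content _
  unfold Spec_detect_log_type
  simp only [detect_log_type, detect_log_type_alt]
  set cls := PySem.Str.lower content with hcls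
  set cl := cls.toList with hcl
  set found := (PySem.List.pyRange 0 (cl.length : Int) 1).foldl
      (fun s i =>
        (pvKeywords.flatMap (fun p => p.2)).foldl
          (fun s kw => if PySem.Chars.startswith (cl.drop i.toNat) kw.toList then PySem.Set.add s kw else s)
          s)
      PySem.Set.empty with hfound
  -- membership in the found-set is exactly keyword occurrence
  have hmem : ∀ kw ∈ pvKeywords.flatMap (fun p => p.2),
      PySem.Set.contains found kw = PySem.Str.isIn kw cls := by
    intro kw hkw
    have hne : kw.toList ≠ [] := patterns_ne_nil kw hkw
    apply Bool.eq_iff_iff.2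
    rw [PySem.Set.contains_iff, hfound,
      mem_scan_fold _ _ (fun i kw => PySem.Chars.startswith (cl.drop i.toNat) kw.toList)]
    simp only [PySem.Set.empty, List.not_mem_nil, false_or]
    rw [PySem.Str.isIn_iff_infix]
    constructor
    · rintro ⟨_, hx⟩
      rcases (scan_pos_iff_infix cl kw.toList hne).1 hx with h | h
      · exact h.isInfix
      · exact h
    · intro h
      exact ⟨hkw, (scan_pos_iff_infix cl kw.toList hne).2 (Or.inr h)⟩
  -- the three tallies equal A's three scores
  have hcnt : ∀ ks : List String, (∀ k ∈ ks, k ∈ pvKeywords.flatMap (fun p => p.2)) →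
      ks.foldl (fun a kw => if PySem.Set.contains found kw then a + 1 else a) (0 : Int)
        = ks.foldl (fun a k => if PySem.Str.isIn k cls then a + 1 else a) 0 := by
    intro ks hks
    rw [foldl_count_eq_filter_length, foldl_count_eq_filter_length,
      List.filter_congr (fun k hk => hmem k (hks k hk))]
  -- B's counts dict is literally the dict of A's three scores
  have hmap : pvKeywords.map (fun p =>
      (p.1, p.2.foldl (fun a kw => if PySem.Set.contains found kw then a + 1 else a) (0 : Int)))
      = [("firmware", fwKeywords.foldl (fun a k => if PySem.Str.isIn k cls then a + 1 else a) 0),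
         ("pipeline", plKeywords.foldl (fun a k => if PySem.Str.isIn k cls then a + 1 else a) 0),
         ("testing", tsKeywords.foldl (fun a k => if PySem.Str.isIn k cls then a + 1 else a) 0)] := by
    have e1 : ["vrm", "voltage", "thermal", "ecc", "memory", "cpu", "bios", "dimm", "sensors", "temperature"] = fwKeywords := rfl
    have e2 : ["build", "deploy", "pipeline", "azure", "jenkins", "docker", "npm", "maven", "gradle"] = plKeywords := rfl
    have e3 : ["test", "assert", "pytest", "jest", "junit", "spec", "mock", "fixture"] = tsKeywords := rfl
    simp only [pvKeywords, List.map, e1, e2, e3]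
    rw [hcnt fwKeywords fw_sub, hcnt plKeywords pl_sub, hcnt tsKeywords ts_sub]
  rw [hmap]
  exact choose_eq _ _ _
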